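-- pv_equiv track=rewrite | github.com/AyushAgnihotri2025/CP-Solutions | GeeksforGeeks/Python3/Medium/Partition Array for Maximum Sum/partition-array-for-maximum-sum.py | solve
-- ===== SOURCE A (Python) =====
-- def solve(n, k, arr):
--     # Code here
--     def msum(start, end):
--         if start > end:
--             return 0
--
--         if start == end:
--             return arr[start]
--         if dp[start][end] == -1:
--             maxval = 0
--             maxele = arr[start]
--             for i, index in enumerate(range(start, min(end+1, start + k))):
--                 maxele = max(maxele, arr[index])
--                 part1sum = maxele * (i + 1)
--                 part2sum = msum(index + 1, end)
--                 maxval = max(maxval, part1sum + part2sum)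
--             dp[start][end] = maxval
--         return dp[start][end]
--
--     dp = [[-1 for _ in range(n)] for _ in range(n)]
--     return msum(0, n - 1)
-- ===== SOURCE B (Python) =====
-- def solve(n, k, arr):
--     # bottom-up 1D DP: best[i] = best total for suffix starting at i
--     best = [0] * (max(n, 0) + 1)
--     for i in range(n - 1, -1, -1):
--         if i == n - 1:
--             best[i] = arr[i]
--         else:
--             m = arr[i]
--             v = 0
--             for j in range(i, min(n, i + k)):
--                 m = max(m, arr[j])
--                 v = max(v, m * (j - i + 1) + best[j + 1])
--             best[i] = v
--     return best[0]
-- ===== Notes on version B (the rewrite author's own statement) =====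
-- stated objective: alternative
-- what changed: Replaced the top-down memoized recursion over an n-by-n table (whose second index is in fact constant) by a bottom-up loop over a 1D array of n+1 suffix values, scanning back at most k positions per cell.
-- outside the precondition, e.g. on solve(3, 0, [1]): A returns 0, B raises IndexError
import Mathlib
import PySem

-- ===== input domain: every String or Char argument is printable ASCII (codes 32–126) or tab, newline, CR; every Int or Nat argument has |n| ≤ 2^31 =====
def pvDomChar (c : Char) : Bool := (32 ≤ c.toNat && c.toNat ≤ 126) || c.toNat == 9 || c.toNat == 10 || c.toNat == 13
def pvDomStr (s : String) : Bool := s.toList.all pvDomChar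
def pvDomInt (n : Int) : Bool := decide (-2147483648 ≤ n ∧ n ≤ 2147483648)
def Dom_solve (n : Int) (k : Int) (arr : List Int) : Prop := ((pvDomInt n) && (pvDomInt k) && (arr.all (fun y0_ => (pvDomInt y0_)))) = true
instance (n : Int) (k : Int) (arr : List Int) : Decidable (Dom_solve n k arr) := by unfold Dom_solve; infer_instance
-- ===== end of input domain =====

-- B replaces A's top-down memoized recursion over an n×n table (whose second index is constant)
-- by a bottom-up loop over a 1D array of n+1 suffix values computing the same values (alternative algorithm).

-- ===== PORT A =====
-- arr[i] on an index proved in range under Pre_ (0 ≤ i < len arr); default 0 never read inside Pre_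
def pvAGet (arr : List Int) (i : Int) : Int := PySem.List.pyGetD arr i 0
-- dp[s][e] read / write (indices proved in range where used)
def pvDpGet (dp : List (List Int)) (s e : Int) : Int :=
  PySem.List.pyGetD (PySem.List.pyGetD dp s []) e (-1)
def pvDpSet (dp : List (List Int)) (s e : Int) (v : Int) : List (List Int) :=
  dp.set s.toNat ((PySem.List.pyGetD dp s []).set e.toNat v)

mutual
-- msum(start, end) with the memo table dp threaded through; fuel only makes the recursion structural
def msumA (arr : List Int) (k endi : Int) (fuel : Nat) (start : Int) (dp : List (List Int)) :
    Int × List (List Int) :=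
  match fuel with
  | 0 => (0, dp)
  | fuel' + 1 =>
    if start > endi then (0, dp)
    else if start = endi then (pvAGet arr start, dp)
    else if pvDpGet dp start endi = -1 then
      let r := msumLoop arr k endi fuel'
        (PySem.List.pyRange start (min (endi + 1) (start + k)) 1) 0 (pvAGet arr start) 0 dp
      let dp' := pvDpSet r.2 start endi r.1
      (pvDpGet dp' start endi, dp')
    else (pvDpGet dp start endi, dp)
  termination_by (fuel, 0)

-- the 'for i, index in enumerate(range(...))' loop, state (maxele, maxval, dp)
def msumLoop (arr : List Int) (k endi : Int) (fuel : Nat) (l : List Int)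
    (i maxele maxval : Int) (dp : List (List Int)) : Int × List (List Int) :=
  match l with
  | [] => (maxval, dp)
  | idx :: rest =>
    let maxele' := max maxele (pvAGet arr idx)
    let part1 := maxele' * (i + 1)
    let r := msumA arr k endi fuel (idx + 1) dp
    msumLoop arr k endi fuel rest (i + 1) maxele' (max maxval (part1 + r.1)) r.2
  termination_by (fuel, l.length + 1)
end

def solve (n : Int) (k : Int) (arr : List Int) : Int :=
  let dp := List.replicate n.toNat (List.replicate n.toNat (-1))
  (msumA arr k (n - 1) (n.toNat + 1) 0 dp).1

-- ===== PORT B =====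
-- inner 'for j in range(i, min(n, i + k))' loop of Source B, state (m, v)
def innerB (arr : List Int) (i : Int) (best : List Int) (l : List Int) (m v : Int) : Int :=
  match l with
  | [] => v
  | j :: rest =>
    let m' := max m (pvAGet arr j)
    innerB arr i best rest m' (max v (m' * (j - i + 1) + PySem.List.pyGetD best (j + 1) 0))

-- outer 'for i in range(n - 1, -1, -1)' loop of Source B, state best
def outerB (arr : List Int) (k n : Int) (l : List Int) (best : List Int) : List Int :=
  match l with
  | [] => best
  | i :: rest =>
    let best' :=
      if i = n - 1 then best.set i.toNat (pvAGet arr i)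
      else best.set i.toNat
        (innerB arr i best (PySem.List.pyRange i (min n (i + k)) 1) (pvAGet arr i) 0)
    outerB arr k n rest best'

def solve_alt (n : Int) (k : Int) (arr : List Int) : Int :=
  let best := List.replicate ((max n 0).toNat + 1) 0
  PySem.List.pyGetD (outerB arr k n (PySem.List.pyRange (n - 1) (-1) (-1)) best) 0 0

-- ===== PRECONDITION & SPEC =====
-- Pre_ excludes n > len(arr): there Python A raises IndexError on every input with k ≥ 1 and
-- returns only in the degenerate k ≤ 0 corner (see claim cites), while B always raises there.
def Pre_solve (n : Int) (k : Int) (arr : List Int) : Prop := n ≤ (arr.length : Int)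
instance (n : Int) (k : Int) (arr : List Int) : Decidable (Pre_solve n k arr) := by
  unfold Pre_solve; infer_instance
def pvWitness_solve : Int × Int × List Int := (3, 2, [1, 15, 7])
def Spec_solve (n : Int) (k : Int) (arr : List Int) (out : Int) : Prop := out = solve_alt n k arr
instance (n : Int) (k : Int) (arr : List Int) (out : Int) : Decidable (Spec_solve n k arr out) := by
  unfold Spec_solve; infer_instance

-- ===== CLAIM (what is proved, stated in full; the proofs are below) =====
def Claim_equal_solve : Prop := ∀ (n : Int) (k : Int) (arr : List Int),
  Dom_solve n k arr → Pre_solve n k arr → Spec_solve n k arr (solve n k arr)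

-- ===== LEMMAS AND PROOFS =====

mutual
-- the pure (memo-free) value of msum, fuel-indexed
def FV (arr : List Int) (k endi : Int) (fuel : Nat) (start : Int) : Int :=
  match fuel with
  | 0 => 0
  | fuel' + 1 =>
    if start > endi then 0
    else if start = endi then pvAGet arr start
    else FLoop arr k endi fuel'
      (PySem.List.pyRange start (min (endi + 1) (start + k)) 1) 0 (pvAGet arr start) 0
  termination_by (fuel, 0)

def FLoop (arr : List Int) (k endi : Int) (fuel : Nat) (l : List Int)
    (i maxele maxval : Int) : Int :=
  match l with
  | [] => maxval
  | idx :: rest =>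
    let maxele' := max maxele (pvAGet arr idx)
    FLoop arr k endi fuel rest (i + 1) maxele'
      (max maxval (maxele' * (i + 1) + FV arr k endi fuel (idx + 1)))
  termination_by (fuel, l.length + 1)
end

-- canonical value of a suffix: V n s = msum(s, n-1)
def Vv (arr : List Int) (k n s : Int) : Int := FV arr k (n - 1) ((n - 1) + 1 - s).toNat s

theorem FLoop_congr (arr : List Int) (k endi : Int) (f1 f2 : Nat) (l : List Int) :
    (∀ j ∈ l, FV arr k endi f1 (j + 1) = FV arr k endi f2 (j + 1)) →
    ∀ (i me mv : Int), FLoop arr k endi f1 l i me mv = FLoop arr k endi f2 l i me mv := by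
  induction l with
  | nil => intro _ i me mv; simp [FLoop]
  | cons j rest ih =>
    intro h i me mv
    simp only [FLoop]
    rw [h j (by simp)]
    exact ih (fun x hx => h x (by simp [hx])) _ _ _

theorem FV_stable (arr : List Int) (k endi : Int) :
    ∀ (f : Nat) (start : Int), (endi + 1 - start).toNat ≤ f →
      FV arr k endi f start = FV arr k endi (endi + 1 - start).toNat start := by
  intro f
  induction f using Nat.strong_induction_on with
  | _ f ih =>
    intro start hf
    by_cases hgt : start > endi
    · have h0 : (endi + 1 - start).toNat = 0 := by omega
      rw [h0]
      cases f with
      | zero => rfl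
      | succ g => simp [FV, hgt]
    · have hd : (endi + 1 - start).toNat = (endi - start).toNat + 1 := by omega
      obtain ⟨g, rfl⟩ : ∃ g, f = g + 1 := ⟨f - 1, by omega⟩
      by_cases heq : start = endi
      · rw [hd]; simp [FV, heq]
      · rw [hd]
        simp only [FV, if_neg (by omega : ¬ start > endi), if_neg heq]
        apply FLoop_congr
        intro j hj
        have hmem := (PySem.List.mem_pyRange_one).mp hj
        have h1 : (endi + 1 - (j + 1)).toNat ≤ g := by omega
        have h2 : (endi + 1 - (j + 1)).toNat ≤ (endi - start).toNat := by omega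
        rw [ih g (by omega) (j + 1) h1,
            ih (endi - start).toNat (by omega) (j + 1) h2]

theorem FV_irrel (arr : List Int) (k endi : Int) (f1 f2 : Nat) (start : Int)
    (h1 : (endi + 1 - start).toNat ≤ f1) (h2 : (endi + 1 - start).toNat ≤ f2) :
    FV arr k endi f1 start = FV arr k endi f2 start := by
  rw [FV_stable arr k endi f1 start h1, FV_stable arr k endi f2 start h2]

-- pyGetD at a nonnegative Int index is getD at the Nat index
theorem pyGetD_nonneg_getD {α : Type} (l : List α) (j : Int) (d : α) (h : 0 ≤ j) :
    PySem.List.pyGetD l j d = l.getD j.toNat d := by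
  rw [← Int.toNat_of_nonneg h, PySem.List.pyGetD_natCast]
  rw [Int.toNat_of_nonneg h]

theorem pyGetD_set_self {α : Type} (l : List α) (i : Int) (v d : α) (h0 : 0 ≤ i)
    (h : i.toNat < l.length) :
    PySem.List.pyGetD (l.set i.toNat v) i d = v := by
  rw [pyGetD_nonneg_getD _ _ _ h0]
  simp [List.getD_eq_getElem?_getD, h]

theorem pyGetD_set_ne {α : Type} (l : List α) (iN : Nat) (j : Int) (v : α) (d : α)
    (h0 : 0 ≤ j) (hne : j ≠ (iN : Int)) :
    PySem.List.pyGetD (l.set iN v) j d = PySem.List.pyGetD l j d := by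
  rw [pyGetD_nonneg_getD _ _ _ h0, pyGetD_nonneg_getD _ _ _ h0]
  have : iN ≠ j.toNat := by omega
  simp [List.getD_eq_getElem?_getD, List.getElem?_set_ne this]

theorem pyGetD_const {α : Type} (l : List α) (e : Int) (d : α) (h0 : 0 ≤ e)
    (h : ∀ x ∈ l, x = d) : PySem.List.pyGetD l e d = d := by
  rw [pyGetD_nonneg_getD _ _ _ h0]
  rcases he : l[e.toNat]? with _ | x
  · simp [List.getD_eq_getElem?_getD, he]
  · have : x ∈ l := List.mem_of_getElem? he
    simp [List.getD_eq_getElem?_getD, he, h x this]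


theorem pvDpGet_pvDpSet_self (dp : List (List Int)) (s e v : Int) (hs0 : 0 ≤ s)
    (hs : s.toNat < dp.length) (he0 : 0 ≤ e)
    (he : e.toNat < (PySem.List.pyGetD dp s []).length) :
    pvDpGet (pvDpSet dp s e v) s e = v := by
  unfold pvDpGet pvDpSet
  rw [pyGetD_set_self _ _ _ _ hs0 hs, pyGetD_set_self _ _ _ _ he0 he]

theorem pvDpGet_pvDpSet_ne (dp : List (List Int)) (s e v s' e' : Int) (hs0 : 0 ≤ s)
    (hs'0 : 0 ≤ s') (hne : s' ≠ s) :
    pvDpGet (pvDpSet dp s e v) s' e' = pvDpGet dp s' e' := by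
  unfold pvDpGet pvDpSet
  rw [pyGetD_set_ne _ _ _ _ _ hs'0 (by rw [Int.toNat_of_nonneg hs0]; exact hne)]

-- the memo-table invariant: square shape, every filled cell of column n-1 holds its true value
def InvA (arr : List Int) (k n : Int) (dp : List (List Int)) : Prop :=
  dp.length = n.toNat ∧ (∀ row ∈ dp, row.length = n.toNat) ∧
  ∀ s : Int, 0 ≤ s → s < n - 1 →
    (pvDpGet dp s (n - 1) = -1 ∨ pvDpGet dp s (n - 1) = Vv arr k n s)

def PropA (arr : List Int) (k n : Int) (fuel : Nat) : Prop :=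
  ∀ (start : Int) (dp : List (List Int)), InvA arr k n dp → 0 ≤ start →
    ((n - 1) + 1 - start).toNat ≤ fuel →
    (msumA arr k (n - 1) fuel start dp).1 = Vv arr k n start ∧
    InvA arr k n (msumA arr k (n - 1) fuel start dp).2

def PropL (arr : List Int) (k n : Int) (fuel : Nat) : Prop :=
  ∀ (l : List Int) (i me mv : Int) (dp : List (List Int)), InvA arr k n dp →
    (∀ j ∈ l, 0 ≤ j ∧ ((n - 1) + 1 - (j + 1)).toNat ≤ fuel) →
    (msumLoop arr k (n - 1) fuel l i me mv dp).1 = FLoop arr k (n - 1) fuel l i me mv ∧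
    InvA arr k n (msumLoop arr k (n - 1) fuel l i me mv dp).2

theorem propA_zero (arr : List Int) (k n : Int) : PropA arr k n 0 := by
  intro start dp hInv h0 hf
  have : Vv arr k n start = 0 := by
    unfold Vv
    rw [(by omega : ((n - 1) + 1 - start).toNat = 0)]
    simp [FV]
  simp [msumA, this, hInv]

theorem propL_of_propA (arr : List Int) (k n : Int) (fuel : Nat)
    (hA : PropA arr k n fuel) : PropL arr k n fuel := by
  intro l
  induction l with
  | nil => intro i me mv dp hInv _; simp [msumLoop, FLoop, hInv]
  | cons j rest ih =>
    intro i me mv dp hInv hl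
    have hj := hl j (by simp)
    have hr := hA (j + 1) dp hInv (by omega) hj.2
    have hFVj : FV arr k (n - 1) fuel (j + 1) = Vv arr k n (j + 1) := by
      unfold Vv
      exact FV_stable arr k (n - 1) fuel (j + 1) hj.2
    simp only [msumLoop, FLoop]
    rw [hFVj, ← hr.1]
    exact ih _ _ _ _ hr.2 (fun x hx => hl x (by simp [hx]))

theorem propA_succ (arr : List Int) (k n : Int) (fuel : Nat)
    (hL : PropL arr k n fuel) : PropA arr k n (fuel + 1) := by
  intro start dp hInv h0 hf
  by_cases hgt : start > n - 1
  · have hV : Vv arr k n start = 0 := by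
      unfold Vv
      rw [(by omega : ((n - 1) + 1 - start).toNat = 0)]
      simp [FV]
    simp [msumA, hgt, hV, hInv]
  · by_cases heq : start = n - 1
    · have hV : Vv arr k n start = pvAGet arr start := by
        unfold Vv
        rw [(by omega : ((n - 1) + 1 - start).toNat = 1)]
        simp [FV, heq]
      have hm : msumA arr k (n - 1) (fuel + 1) start dp = (pvAGet arr start, dp) := by
        simp [msumA, heq]
      rw [hm]
      exact ⟨hV.symm, hInv⟩
    · -- start < n - 1
      have hlt : start < n - 1 := by omega
      have hn2 : 2 ≤ n := by omega
      by_cases hmemo : pvDpGet dp start (n - 1) = -1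
      · -- compute via the loop, then write the memo cell
        set R := msumLoop arr k (n - 1) fuel
          (PySem.List.pyRange start (min ((n - 1) + 1) (start + k)) 1)
          0 (pvAGet arr start) 0 dp with hR
        have hcond : ∀ j ∈ PySem.List.pyRange start (min ((n - 1) + 1) (start + k)) 1,
            0 ≤ j ∧ ((n - 1) + 1 - (j + 1)).toNat ≤ fuel := by
          intro j hj
          obtain ⟨hj1, hj2⟩ := (PySem.List.mem_pyRange_one).mp hj
          exact ⟨by omega, by omega⟩
        have hr := hL (PySem.List.pyRange start (min ((n - 1) + 1) (start + k)) 1)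
          0 (pvAGet arr start) 0 dp hInv hcond
        -- the loop value is the canonical value of start
        have hV : (msumLoop arr k (n - 1) fuel
            (PySem.List.pyRange start (min ((n - 1) + 1) (start + k)) 1)
            0 (pvAGet arr start) 0 dp).1 = Vv arr k n start := by
          rw [hr.1]
          unfold Vv
          obtain ⟨c, hc⟩ : ∃ c, ((n - 1) + 1 - start).toNat = c + 1 := ⟨((n - 1) + 1 - start).toNat - 1, by omega⟩
          rw [hc]
          simp only [FV, if_neg (by omega : ¬ start > n - 1), if_neg heq]
          apply FLoop_congr
          intro j hj
          have := (PySem.List.mem_pyRange_one).mp hj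
          exact FV_irrel arr k (n - 1) fuel c (j + 1) (by omega) (by omega)
        obtain ⟨hlen, hrows, hcol⟩ := hr.2
        have hsl : start.toNat < R.2.length := by rw [hlen]; omega
        have hrowmem : PySem.List.pyGetD R.2 start [] ∈ R.2 := by
          rw [pyGetD_nonneg_getD _ _ _ h0, List.getD_eq_getElem _ _ hsl]
          exact List.getElem_mem _
        have hrl : (PySem.List.pyGetD R.2 start []).length = n.toNat := hrows _ hrowmem
        have he : (n - 1).toNat < (PySem.List.pyGetD R.2 start []).length := by
          rw [hrl]; omega
        have hget : pvDpGet (pvDpSet R.2 start (n - 1) R.1) start (n - 1) = R.1 :=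
          pvDpGet_pvDpSet_self R.2 start (n - 1) R.1 h0 hsl (by omega) he
        have hm : msumA arr k (n - 1) (fuel + 1) start dp =
            (pvDpGet (pvDpSet R.2 start (n - 1) R.1) start (n - 1),
             pvDpSet R.2 start (n - 1) R.1) := by
          rw [msumA]
          simp only [if_neg hgt, if_neg heq, if_pos hmemo, ← hR]
        rw [hm]
        constructor
        · rw [hget]; exact hV
        · refine ⟨?_, ?_, ?_⟩
          · unfold pvDpSet; rw [List.length_set]; exact hlen
          · intro row hrow
            rcases List.mem_or_eq_of_mem_set hrow with hmem | hnew
            · exact hrows row hmem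
            · rw [hnew, List.length_set]; exact hrl
          · intro s' hs'0 hs'lt
            by_cases hss : s' = start
            · right
              rw [hss, hget]
              exact hV
            · rw [pvDpGet_pvDpSet_ne R.2 start (n - 1) R.1 s' (n - 1) h0 hs'0 hss]
              exact hcol s' hs'0 hs'lt
      · -- memo hit
        have := hInv.2.2 start h0 hlt
        have hVal : pvDpGet dp start (n - 1) = Vv arr k n start := by tauto
        have hm : msumA arr k (n - 1) (fuel + 1) start dp = (pvDpGet dp start (n - 1), dp) := by
          simp [msumA, hgt, heq, hmemo]
        rw [hm]
        exact ⟨hVal, hInv⟩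

theorem propA_all (arr : List Int) (k n : Int) : ∀ fuel, PropA arr k n fuel := by
  intro fuel
  induction fuel with
  | zero => exact propA_zero arr k n
  | succ f ih => exact propA_succ arr k n f (propL_of_propA arr k n f ih)


theorem innerB_eq (arr : List Int) (k endi i : Int) (best : List Int) (f : Nat) (hi : Int) :
    ∀ (c : Nat) (lo m v : Int), (hi - lo).toNat ≤ c →
      (∀ j : Int, lo ≤ j → j < hi → PySem.List.pyGetD best (j + 1) 0 = FV arr k endi f (j + 1)) →
      innerB arr i best (PySem.List.pyRange lo hi 1) m v
        = FLoop arr k endi f (PySem.List.pyRange lo hi 1) (lo - i) m v := by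
  intro c
  induction c with
  | zero =>
    intro lo m v hc hb
    rw [PySem.List.pyRange_one_eq_nil (by omega)]
    simp [innerB, FLoop]
  | succ c ih =>
    intro lo m v hc hb
    by_cases hlt : lo < hi
    · rw [PySem.List.pyRange_one_cons hlt]
      simp only [innerB, FLoop]
      rw [hb lo le_rfl hlt]
      have hcounter : lo - i + 1 = lo + 1 - i := by ring
      rw [hcounter]
      exact ih (lo + 1) _ _ (by omega) (fun j hj1 hj2 => hb j (by omega) hj2)
    · rw [PySem.List.pyRange_one_eq_nil (by omega)]
      simp [innerB, FLoop]

-- loop invariant of B's outer loop: all suffix cells from t on hold their canonical value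
def BInvP (arr : List Int) (k n t : Int) (best : List Int) : Prop :=
  best.length = n.toNat + 1 ∧
  ∀ j : Int, t ≤ j → j ≤ n → PySem.List.pyGetD best j 0 = Vv arr k n j

theorem outerB_correct (arr : List Int) (k n : Int) :
    ∀ (c : Nat) (lo : Int) (best : List Int), (lo + 1).toNat ≤ c → -1 ≤ lo → lo ≤ n - 1 →
      BInvP arr k n (lo + 1) best →
      BInvP arr k n 0 (outerB arr k n (PySem.List.pyRange lo (-1) (-1)) best) := by
  intro c
  induction c with
  | zero =>
    intro lo best hc hlo1 hlo2 hb
    rw [PySem.List.pyRange_neg_one_eq_nil (by omega)]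
    simp only [outerB]
    rw [(by omega : lo + 1 = 0)] at hb
    exact hb
  | succ c ih =>
    intro lo best hc hlo1 hlo2 hb
    by_cases hneg : lo ≤ -1
    · rw [PySem.List.pyRange_neg_one_eq_nil (by omega)]
      simp only [outerB]
      rw [(by omega : lo + 1 = 0)] at hb
      exact hb
    · have hlo0 : 0 ≤ lo := by omega
      have hn1 : 1 ≤ n := by omega
      rw [PySem.List.pyRange_neg_one_cons (by omega : -1 < lo)]
      simp only [outerB]
      have hl : lo.toNat < best.length := by rw [hb.1]; omega
      have hstep : ∀ X : Int, X = Vv arr k n lo →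
          BInvP arr k n lo (best.set lo.toNat X) := by
        intro X hX
        refine ⟨by rw [List.length_set]; exact hb.1, ?_⟩
        intro j hj1 hj2
        by_cases hj : j = lo
        · rw [hj, pyGetD_set_self _ _ _ _ hlo0 hl, hX]
        · rw [pyGetD_set_ne _ _ _ _ _ (by omega) (by rw [Int.toNat_of_nonneg hlo0]; omega)]
          exact hb.2 j (by omega) hj2
      by_cases hln : lo = n - 1
      · rw [if_pos hln]
        apply ih (lo - 1) _ (by omega) (by omega) (by omega)
        rw [(by ring : lo - 1 + 1 = lo)]
        apply hstep
        unfold Vv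
        rw [(by omega : ((n - 1) + 1 - lo).toNat = 1)]
        simp [FV, hln]
      · rw [if_neg hln]
        apply ih (lo - 1) _ (by omega) (by omega) (by omega)
        rw [(by ring : lo - 1 + 1 = lo)]
        apply hstep
        have hlt : lo < n - 1 := by omega
        unfold Vv
        obtain ⟨c', hc'⟩ : ∃ c', ((n - 1) + 1 - lo).toNat = c' + 1 :=
          ⟨((n - 1) + 1 - lo).toNat - 1, by omega⟩
        rw [hc']
        simp only [FV, if_neg (by omega : ¬ lo > n - 1), if_neg (by omega : ¬ lo = n - 1)]
        have hmin : min ((n - 1) + 1) (lo + k) = min n (lo + k) := by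
          rw [(by ring : (n : Int) - 1 + 1 = n)]
        rw [hmin]
        have := innerB_eq arr k (n - 1) lo best c' (min n (lo + k))
          (min n (lo + k) - lo).toNat lo (pvAGet arr lo) 0 le_rfl ?_
        · rw [this, sub_self]
        · intro j hj1 hj2
          have hjn : j + 1 ≤ n := by omega
          rw [hb.2 (j + 1) (by omega) hjn]
          unfold Vv
          exact (FV_stable arr k (n - 1) c' (j + 1) (by omega)).symm

theorem solve_eq_Vv (n k : Int) (arr : List Int) : solve n k arr = Vv arr k n 0 := by
  unfold solve
  have hInv0 : InvA arr k n (List.replicate n.toNat (List.replicate n.toNat (-1))) := by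
    refine ⟨by simp, fun row h => by rw [List.eq_of_mem_replicate h]; simp, ?_⟩
    intro s hs0 hslt
    left
    unfold pvDpGet
    have hsr : s.toNat < (List.replicate n.toNat (List.replicate n.toNat (-1) : List Int)).length := by
      simp; omega
    rw [pyGetD_nonneg_getD _ _ _ hs0, List.getD_eq_getElem _ _ hsr, List.getElem_replicate]
    exact pyGetD_const _ _ _ (by omega) (fun x h => List.eq_of_mem_replicate h)
  exact ((propA_all arr k n (n.toNat + 1)) 0 _ hInv0 le_rfl (by omega)).1

theorem solve_alt_eq_Vv (n k : Int) (arr : List Int) : solve_alt n k arr = Vv arr k n 0 := by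
  unfold solve_alt
  by_cases hn : n ≤ 0
  · rw [PySem.List.pyRange_neg_one_eq_nil (by omega)]
    simp only [outerB]
    have hm0 : (max n 0).toNat = 0 := by omega
    rw [hm0]
    have hV : Vv arr k n 0 = 0 := by
      unfold Vv
      rw [(by omega : ((n - 1) + 1 - 0).toNat = 0)]
      simp [FV]
    rw [hV]
    simp [PySem.List.pyGetD_zero]
  · have hn1 : 1 ≤ n := by omega
    have hb0 : BInvP arr k n n (List.replicate ((max n 0).toNat + 1) 0) := by
      refine ⟨by simp; omega, ?_⟩
      intro j hj1 hj2
      have hj : j = n := le_antisymm hj2 hj1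
      rw [hj]
      have hjr : n.toNat < (List.replicate ((max n 0).toNat + 1) (0 : Int)).length := by
        simp only [List.length_replicate]; omega
      rw [pyGetD_nonneg_getD _ _ _ (by omega), List.getD_eq_getElem _ _ hjr,
          List.getElem_replicate]
      unfold Vv
      rw [(by omega : ((n - 1) + 1 - n).toNat = 0)]
      simp [FV]
    have hfin := outerB_correct arr k n n.toNat (n - 1)
      (List.replicate ((max n 0).toNat + 1) 0) (by omega) (by omega) (by omega)
      (by rw [(by ring : n - 1 + 1 = n)]; exact hb0)
    exact hfin.2 0 le_rfl (by omega)

-- ===== VERDICT (by name: the statement is the Claim_ definition above) =====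
theorem solve_spec : Claim_equal_solve := by
  intro n k arr _ _
  unfold Spec_solve
  rw [solve_eq_Vv, solve_alt_eq_Vv]
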